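-- pv_equiv track=rewrite | github.com/venkatmiriyala19/CodingNinjas | Ninja and Time.py | fenwickTree
-- ===== SOURCE A (Python) =====
-- def fenwickTree(arr, n):
-- 	summer=[0]
-- 	max=0;
-- 	for i in range(1,n):
-- 		max=0
-- 		for j in range(i):
-- 			if arr[j]>arr[i]:
-- 				max+=arr[j]
-- 		summer.append(max)
-- 	return summer
-- ===== SOURCE B (Python) =====
-- def fenwickTree(arr, n):
--     # Keeps the already-seen prefix as a sorted list plus its running total;
--     # each answer is total - (sum of the sorted <=-prefix), scanned with early exit.
--     res = [0]
--     seen = []   # sorted ascending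
--     total = 0
--     for i in range(1, n):
--         x = arr[i - 1]
--         pos = 0
--         while pos < len(seen) and seen[pos] <= x:
--             pos += 1
--         seen.insert(pos, x)
--         total += x
--         v = arr[i]
--         le = 0
--         pos = 0
--         while pos < len(seen) and seen[pos] <= v:
--             le += seen[pos]
--             pos += 1
--         res.append(total - le)
--     return res
-- ===== Notes on version B (the rewrite author's own statement) =====
-- stated objective: alternative
-- what changed: B replaces A's nested full rescans of the prefix by an incrementally maintained sorted list with a running total: each answer is the running total minus the sum of the sorted <=-prefix, scanned with early exit.
import Mathlib
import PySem

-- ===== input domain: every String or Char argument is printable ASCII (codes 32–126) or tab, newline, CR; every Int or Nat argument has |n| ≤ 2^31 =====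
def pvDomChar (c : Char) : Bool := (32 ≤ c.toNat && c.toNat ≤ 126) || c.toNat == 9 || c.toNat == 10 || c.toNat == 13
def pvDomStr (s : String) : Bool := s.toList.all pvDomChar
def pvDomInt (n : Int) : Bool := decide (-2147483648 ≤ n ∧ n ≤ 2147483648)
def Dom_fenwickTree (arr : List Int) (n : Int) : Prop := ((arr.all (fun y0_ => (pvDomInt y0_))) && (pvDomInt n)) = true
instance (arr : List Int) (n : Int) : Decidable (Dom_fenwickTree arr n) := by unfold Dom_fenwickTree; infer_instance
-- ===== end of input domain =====

-- B replaces A's nested full rescans by a maintained sorted prefix with a running total: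
-- each answer is total − (sum of the sorted ≤-prefix, scanned with early exit); objective: alternative.

-- ===== PORT A =====
def fenwickTree (arr : List Int) (n : Int) : List Int :=
  -- summer=[0]; for i in range(1,n): max=0; for j in range(i): if arr[j]>arr[i]: max+=arr[j]; summer.append(max)
  (PySem.List.pyRange 1 n).foldl
    (fun summer i =>
      let mx := (PySem.List.pyRange 0 i).foldl
        (fun mx j =>
          if PySem.List.pyGetD arr j 0 > PySem.List.pyGetD arr i 0 then mx + PySem.List.pyGetD arr j 0
          else mx) 0
      summer ++ [mx]) [0]

-- ===== PORT B =====
-- linear insertion into the sorted list `seen`, keeping order (after equal elements)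
def pvInsort : List Int → Int → List Int
  | [], v => [v]
  | x :: xs, v => if x ≤ v then x :: pvInsort xs v else v :: x :: xs

-- early-exit scan of the sorted ≤-prefix, summing it
def pvSumLE : List Int → Int → Int
  | [], _ => 0
  | x :: xs, v => if x ≤ v then x + pvSumLE xs v else 0

def fenwickTree_alt (arr : List Int) (n : Int) : List Int :=
  ((PySem.List.pyRange 1 n).foldl
    (fun st i =>
      let x := PySem.List.pyGetD arr (i - 1) 0
      let seen := pvInsort st.2.1 x
      let total := st.2.2 + x
      let v := PySem.List.pyGetD arr i 0
      (st.1 ++ [total - pvSumLE seen v], seen, total))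
    ([0], [], 0)).1

-- ===== PRECONDITION & SPEC =====
-- Pre_ excludes exactly the inputs where A raises IndexError: n larger than len(arr).
def Pre_fenwickTree (arr : List Int) (n : Int) : Prop := n ≤ (arr.length : Int)
instance (arr : List Int) (n : Int) : Decidable (Pre_fenwickTree arr n) := by
  unfold Pre_fenwickTree; infer_instance

def pvWitness_fenwickTree : List Int × Int := ([3, 1, 2], 3)

def Spec_fenwickTree (arr : List Int) (n : Int) (out : List Int) : Prop := out = fenwickTree_alt arr n
instance (arr : List Int) (n : Int) (out : List Int) : Decidable (Spec_fenwickTree arr n out) := by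
  unfold Spec_fenwickTree; infer_instance

-- ===== CLAIM (what is proved, stated in full; the proofs are below) =====
def Claim_equal_fenwickTree : Prop := ∀ (arr : List Int) (n : Int), Dom_fenwickTree arr n → Pre_fenwickTree arr n → Spec_fenwickTree arr n (fenwickTree arr n)

-- ===== LEMMAS AND PROOFS =====

-- the two loop bodies, named for the proofs
def pvStepA (arr : List Int) (summer : List Int) (i : Int) : List Int :=
  summer ++ [(PySem.List.pyRange 0 i).foldl
    (fun mx j =>
      if PySem.List.pyGetD arr j 0 > PySem.List.pyGetD arr i 0 then mx + PySem.List.pyGetD arr j 0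
      else mx) 0]

def pvStepB (arr : List Int) (st : List Int × List Int × Int) (i : Int) : List Int × List Int × Int :=
  let x := PySem.List.pyGetD arr (i - 1) 0
  let seen := pvInsort st.2.1 x
  let total := st.2.2 + x
  let v := PySem.List.pyGetD arr i 0
  (st.1 ++ [total - pvSumLE seen v], seen, total)

def pvBfold (arr : List Int) (n : Int) : List Int × List Int × Int :=
  (PySem.List.pyRange 1 n).foldl (pvStepB arr) ([0], [], 0)

theorem fenwickTree_eq_fold (arr : List Int) (n : Int) :
    fenwickTree arr n = (PySem.List.pyRange 1 n).foldl (pvStepA arr) [0] := rfl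

theorem fenwickTree_alt_eq_fold (arr : List Int) (n : Int) :
    fenwickTree_alt arr n = (pvBfold arr n).1 := rfl

-- `pvInsort seen x` is `x :: seen` up to order
theorem pvInsort_perm (s : List Int) (x : Int) : (pvInsort s x).Perm (x :: s) := by
  induction s with
  | nil => simp [pvInsort]
  | cons a t ih =>
      by_cases h : a ≤ x
      · simpa [pvInsort, h] using ((ih.cons a).trans (List.Perm.swap x a t))
      · simp [pvInsort, h]

theorem pvInsort_sorted (s : List Int) (x : Int) (hs : List.Pairwise (· ≤ ·) s) :
    List.Pairwise (· ≤ ·) (pvInsort s x) := by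
  induction s with
  | nil => simp [pvInsort]
  | cons a t ih =>
      rw [List.pairwise_cons] at hs
      by_cases h : a ≤ x
      · rw [pvInsort, if_pos h]
        refine List.pairwise_cons.mpr ⟨?_, ih hs.2⟩
        intro y hy
        rcases List.mem_cons.mp ((pvInsort_perm t x).mem_iff.mp hy) with h1 | h1
        · exact h1 ▸ h
        · exact hs.1 y h1
      · have hx : x ≤ a := by omega
        rw [pvInsort, if_neg h]
        refine List.pairwise_cons.mpr ⟨?_, List.pairwise_cons.mpr hs⟩
        intro y hy
        rcases List.mem_cons.mp hy with rfl | hy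
        · exact hx
        · exact le_trans hx (hs.1 y hy)

-- on a sorted list the early-exit scan sums exactly the elements ≤ v
theorem pvSumLE_eq (s : List Int) (v : Int) (hs : List.Pairwise (· ≤ ·) s) :
    pvSumLE s v = (s.filter (fun y => decide (y ≤ v))).sum := by
  induction s with
  | nil => simp [pvSumLE]
  | cons a t ih =>
      rw [List.pairwise_cons] at hs
      by_cases h : a ≤ v
      · simp [pvSumLE, h, ih hs.2]
      · have hnone : ∀ y ∈ a :: t, ¬ (y ≤ v) := by
          intro y hy
          rcases List.mem_cons.mp hy with rfl | hy
          · exact h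
          · have := hs.1 y hy; omega
        rw [List.filter_eq_nil_iff.mpr (by intro y hy; simpa using hnone y hy)]
        simp [pvSumLE, h]

-- sum of the > v elements = total minus sum of the ≤ v elements
theorem sum_gt_eq_sub (l : List Int) (v : Int) :
    ((l.filter (fun y => decide (v < y))).sum) = l.sum - (l.filter (fun y => decide (y ≤ v))).sum := by
  induction l with
  | nil => simp
  | cons a t ih =>
      by_cases h : v < a
      · have h' : ¬ (a ≤ v) := by omega
        simp [h, h', ih]; ring
      · have h' : a ≤ v := by omega
        simp [h, h', ih]

-- A's inner loop computes the sum of the earlier elements greater than v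
theorem innerA_eq (arr : List Int) (v : Int) (k : Nat) (hk : k ≤ arr.length) :
    (PySem.List.pyRange 0 (k : Int)).foldl
      (fun mx j => if PySem.List.pyGetD arr j 0 > v then mx + PySem.List.pyGetD arr j 0 else mx) 0
    = ((arr.take k).filter (fun y => decide (v < y))).sum := by
  induction k with
  | zero => simp [PySem.List.pyRange]
  | succ k ih =>
      have hk' : k ≤ arr.length := Nat.le_of_succ_le hk
      have hklt : k < arr.length := hk
      have hpeel : PySem.List.pyRange 0 ((k : Int) + 1) = PySem.List.pyRange 0 (k : Int) ++ [(k : Int)] :=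
        PySem.List.pyRange_one_succ_right (by positivity)
      have hget : PySem.List.pyGetD arr (k : Int) 0 = arr[k] :=
        PySem.List.pyGetD_eq_getElem arr 0 (by positivity) (by exact_mod_cast hklt)
      rw [show ((k + 1 : Nat) : Int) = (k : Int) + 1 by push_cast; ring, hpeel, List.foldl_append,
          ih hk']
      simp only [List.foldl_cons, List.foldl_nil, hget, gt_iff_lt]
      rw [List.take_succ_eq_append_getElem hklt, List.filter_append, List.sum_append]
      by_cases h : v < arr[k] <;> simp [h]

-- joint loop invariant: after the iterations i = 1 .. k-1 the two results agree,
-- `seen` is a sorted permutation of arr[:k-1] and `total` is its sum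
theorem loop_inv (arr : List Int) (k : Nat) (hk : (k : Int) ≤ arr.length) :
    (pvBfold arr k).1 = (PySem.List.pyRange 1 (k : Int)).foldl (pvStepA arr) [0]
    ∧ (pvBfold arr k).2.1.Perm (arr.take (k - 1))
    ∧ List.Pairwise (· ≤ ·) (pvBfold arr k).2.1
    ∧ (pvBfold arr k).2.2 = (arr.take (k - 1)).sum := by
  induction k with
  | zero => simp [pvBfold, PySem.List.pyRange]
  | succ k ih =>
      rcases Nat.eq_zero_or_pos k with rfl | hkpos
      · simp [pvBfold, PySem.List.pyRange_one_eq_nil (by norm_num : (1:Int) ≤ 1)]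
      · have hk' : (k : Int) ≤ arr.length := by push_cast at hk ⊢; omega
        have hklt : k < arr.length := by exact_mod_cast (by push_cast at hk; omega : (k:Int) < arr.length)
        obtain ⟨ihres, ihperm, ihsort, ihtot⟩ := ih hk'
        have hpeel : PySem.List.pyRange 1 ((k : Int) + 1) = PySem.List.pyRange 1 (k : Int) ++ [(k : Int)] :=
          PySem.List.pyRange_one_succ_right (by exact_mod_cast hkpos)
        have hcast : ((k + 1 : Nat) : Int) = (k : Int) + 1 := by push_cast; ring
        have hBsucc : pvBfold arr ((k + 1 : Nat) : Int) = pvStepB arr (pvBfold arr k) (k : Int) := by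
          unfold pvBfold
          rw [hcast, hpeel, List.foldl_append, List.foldl_cons, List.foldl_nil]
        have hgetx : PySem.List.pyGetD arr ((k : Int) - 1) 0 = arr[k - 1] := by
          rw [show ((k : Int) - 1) = ((k - 1 : Nat) : Int) by push_cast [hkpos]; ring]
          exact PySem.List.pyGetD_eq_getElem arr 0 (by positivity) (by omega)
        have htake : arr.take k = arr.take (k - 1) ++ [arr[k - 1]] := by
          have := List.take_succ_eq_append_getElem (l := arr) (i := k - 1) (by omega)
          rwa [show k - 1 + 1 = k by omega] at this
        -- the new seen list: sorted permutation of arr[:k]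
        have hperm' : (pvInsort (pvBfold arr k).2.1 arr[k - 1]).Perm (arr.take k) := by
          refine (pvInsort_perm _ _).trans ?_
          rw [htake]
          exact ((ihperm.cons arr[k - 1]).trans (List.perm_append_singleton _ _).symm)
        have hsort' : List.Pairwise (· ≤ ·) (pvInsort (pvBfold arr k).2.1 arr[k - 1]) :=
          pvInsort_sorted _ _ ihsort
        have htot' : (pvBfold arr k).2.2 + arr[k - 1] = (arr.take k).sum := by
          rw [ihtot, htake, List.sum_append]
          simp only [List.sum_cons, List.sum_nil]
          ring
        -- the appended value equals A's inner sum
        have happ : (pvBfold arr k).2.2 + arr[k - 1]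
              - pvSumLE (pvInsort (pvBfold arr k).2.1 arr[k - 1]) (PySem.List.pyGetD arr (k : Int) 0)
            = ((arr.take k).filter (fun y => decide (PySem.List.pyGetD arr (k : Int) 0 < y))).sum := by
          rw [htot', pvSumLE_eq _ _ hsort', ((hperm'.filter _).sum_eq), sum_gt_eq_sub]
        refine ⟨?_, ?_, ?_, ?_⟩
        · rw [hBsucc, hcast, hpeel, List.foldl_append, List.foldl_cons, List.foldl_nil, ← ihres]
          simp only [pvStepB, pvStepA]
          rw [hgetx, happ, innerA_eq arr (PySem.List.pyGetD arr (k : Int) 0) k (by omega)]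
        · rw [hBsucc]
          simp only [pvStepB, hgetx, Nat.add_sub_cancel]
          exact hperm'
        · rw [hBsucc]
          simp only [pvStepB, hgetx]
          exact hsort'
        · rw [hBsucc]
          simp only [pvStepB, hgetx, Nat.add_sub_cancel]
          exact htot'

-- ===== VERDICT (by name: the statement is the Claim_ definition above) =====
theorem fenwickTree_spec : Claim_equal_fenwickTree := by
  intro arr n hdom hpre
  unfold Spec_fenwickTree
  rw [fenwickTree_eq_fold, fenwickTree_alt_eq_fold]
  by_cases hn : 0 ≤ n
  · have hn' : n = ((n.toNat : Nat) : Int) := by omega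
    have hk : ((n.toNat : Nat) : Int) ≤ arr.length := by
      have := hpre; unfold Pre_fenwickTree at this; omega
    rw [hn']
    exact ((loop_inv arr n.toNat hk).1).symm
  · rw [PySem.List.pyRange_one_eq_nil (by omega : n ≤ 1)]
    unfold pvBfold
    rw [PySem.List.pyRange_one_eq_nil (by omega : n ≤ 1)]
    rfl
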